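-- pv_equiv track=rewrite | github.com/manubot/manubot | manubot/cite/citekey.py | infer_citekey_prefix
-- ===== SOURCE A (Python) =====
-- citeproc_retrievers = {
--     "doi": "manubot.cite.doi.get_doi_csl_item",
--     "pmid": "manubot.cite.pubmed.get_pubmed_csl_item",
--     "pmcid": "manubot.cite.pubmed.get_pmc_csl_item",
--     "arxiv": "manubot.cite.arxiv.get_arxiv_csl_item",
--     "isbn": "manubot.cite.isbn.get_isbn_csl_item",
--     "wikidata": "manubot.cite.wikidata.get_wikidata_csl_item",
--     "url": "manubot.cite.url.get_url_csl_item",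
-- }
--
-- def infer_citekey_prefix(citekey):
--     """
--     Passthrough citekey if it has a valid citation key prefix. Otherwise,
--     if the lowercase citekey prefix is valid, convert the prefix to lowercase.
--     Otherwise, assume citekey is raw and prepend "raw:".
--     """
--     prefixes = [f"{x}:" for x in list(citeproc_retrievers) + ["raw"]]
--     for prefix in prefixes:
--         if citekey.startswith(prefix):
--             return citekey
--         if citekey.lower().startswith(prefix):
--             return prefix + citekey[len(prefix) :]
--     return f"raw:{citekey}"
-- ===== SOURCE B (Python) =====
-- citeproc_retrievers = {
--     "doi": "manubot.cite.doi.get_doi_csl_item",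
--     "pmid": "manubot.cite.pubmed.get_pubmed_csl_item",
--     "pmcid": "manubot.cite.pubmed.get_pmc_csl_item",
--     "arxiv": "manubot.cite.arxiv.get_arxiv_csl_item",
--     "isbn": "manubot.cite.isbn.get_isbn_csl_item",
--     "wikidata": "manubot.cite.wikidata.get_wikidata_csl_item",
--     "url": "manubot.cite.url.get_url_csl_item",
-- }
--
-- _valid_prefixes = set(citeproc_retrievers) | {"raw"}
--
--
-- def infer_citekey_prefix(citekey):
--     """
--     Passthrough citekey if it has a valid citation key prefix. Otherwise,
--     if the lowercase citekey prefix is valid, convert the prefix to lowercase.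
--     Otherwise, assume citekey is raw and prepend "raw:".
--     """
--     head, sep, tail = citekey.partition(":")
--     if sep and head.lower() in _valid_prefixes:
--         return head.lower() + ":" + tail
--     return "raw:" + citekey
-- ===== Notes on version B (the rewrite author's own statement) =====
-- stated objective: idiomatic
-- what changed: Replaces the loop over the eight colon-terminated candidate prefixes tested with startswith on the key and its lowercased copy by a single partition at the first colon followed by one set-membership test of the lowercased head.
import Mathlib
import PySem

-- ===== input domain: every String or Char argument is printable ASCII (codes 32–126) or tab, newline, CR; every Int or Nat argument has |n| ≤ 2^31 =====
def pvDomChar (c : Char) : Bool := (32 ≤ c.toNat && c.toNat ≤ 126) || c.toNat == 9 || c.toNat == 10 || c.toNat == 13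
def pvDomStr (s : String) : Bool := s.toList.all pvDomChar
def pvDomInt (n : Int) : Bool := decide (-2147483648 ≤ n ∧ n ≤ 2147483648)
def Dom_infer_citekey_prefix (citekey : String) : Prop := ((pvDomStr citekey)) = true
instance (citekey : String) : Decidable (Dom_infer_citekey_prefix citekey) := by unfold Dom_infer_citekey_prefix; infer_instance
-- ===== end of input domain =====

-- B replaces A's linear scan over candidate "prefix:" strings by one partition at the
-- first colon and a single set-membership test of the lowercased head (idiomatic).


-- ===== PORT A =====
-- list(citeproc_retrievers) + ["raw"]  (the dict keys in insertion order)
def pvWordsA : List (List Char) :=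
  (["doi", "pmid", "pmcid", "arxiv", "isbn", "wikidata", "url"].map String.toList) ++ ["raw".toList]

-- prefixes = [f"{x}:" for x in list(citeproc_retrievers) + ["raw"]]
def pvPrefixesA : List (List Char) := pvWordsA.map (fun w => w ++ [':'])

-- the 'for prefix in prefixes' loop, on code points
def pvLoopA (cs : List Char) : List (List Char) → List Char
  | [] => "raw:".toList ++ cs                                    -- return f"raw:{citekey}"
  | p :: rest =>
      if PySem.Chars.startswith cs p then cs                      -- citekey.startswith(prefix)
      else if PySem.Chars.startswith (PySem.Chars.lower cs) p then
        p ++ PySem.Chars.slice cs (some (PySem.Chars.len p)) none -- prefix + citekey[len(prefix):]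
      else pvLoopA cs rest

def infer_citekey_prefix (citekey : String) : String :=
  String.ofList (pvLoopA citekey.toList pvPrefixesA)

-- ===== PORT B =====
-- _valid_prefixes = set(citeproc_retrievers) | {"raw"}
def pvValidB : PySem.Set (List Char) :=
  PySem.Set.union
    (PySem.Set.ofList (["doi", "pmid", "pmcid", "arxiv", "isbn", "wikidata", "url"].map String.toList))
    ["raw".toList]

-- citekey.partition(":") on code points: none ↔ sep == "" (no colon); some (head, tail) otherwise
def pvPartitionColon : List Char → Option (List Char × List Char)
  | [] => none
  | c :: rest =>
      if c = ':' then some ([], rest)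
      else
        match pvPartitionColon rest with
        | some (h, t) => some (c :: h, t)
        | none => none

def infer_citekey_prefix_alt (citekey : String) : String :=
  String.ofList (
    match pvPartitionColon citekey.toList with
    | some (h, t) =>
        let lh := PySem.Chars.lower h
        if PySem.Set.contains pvValidB lh then lh ++ ':' :: t    -- head.lower() + ":" + tail
        else "raw:".toList ++ citekey.toList                     -- "raw:" + citekey
    | none => "raw:".toList ++ citekey.toList)

-- ===== PRECONDITION & SPEC =====
def Spec_infer_citekey_prefix (citekey : String) (out : String) : Prop := out = infer_citekey_prefix_alt citekey
instance (citekey : String) (out : String) : Decidable (Spec_infer_citekey_prefix citekey out) := by unfold Spec_infer_citekey_prefix; infer_instance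

-- ===== CLAIM (what is proved, stated in full; the proofs are below) =====
def Claim_equal_infer_citekey_prefix : Prop := ∀ (citekey : String), Dom_infer_citekey_prefix citekey → Spec_infer_citekey_prefix citekey (infer_citekey_prefix citekey)

-- ===== LEMMAS AND PROOFS =====

theorem pvPartitionColon_none {cs : List Char} (h : pvPartitionColon cs = none) : ':' ∉ cs := by
  induction cs with
  | nil => simp
  | cons c rest ih =>
      by_cases hc : c = ':'
      · simp [pvPartitionColon, hc] at h
      · simp only [pvPartitionColon, if_neg hc] at h
        cases hp : pvPartitionColon rest with
        | some v => rw [hp] at h; cases v; simp at h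
        | none => exact fun hm => (List.mem_cons.mp hm).elim (fun he => hc he.symm) (ih hp)

theorem pvPartitionColon_some {cs h t : List Char}
    (hp : pvPartitionColon cs = some (h, t)) : cs = h ++ ':' :: t ∧ ':' ∉ h := by
  induction cs generalizing h t with
  | nil => simp [pvPartitionColon] at hp
  | cons c rest ih =>
      by_cases hc : c = ':'
      · simp [pvPartitionColon, hc] at hp
        simp [hc, hp.1, hp.2]
      · simp only [pvPartitionColon, if_neg hc] at hp
        cases hq : pvPartitionColon rest with
        | none => rw [hq] at hp; simp at hp
        | some v =>
            obtain ⟨h', t'⟩ := v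
            rw [hq] at hp
            simp at hp
            obtain ⟨rfl, rfl⟩ := hp
            obtain ⟨hcs, hnc⟩ := ih hq
            constructor
            · simp [hcs]
            · exact fun hm => (List.mem_cons.mp hm).elim (fun he => hc he.symm) hnc

theorem pvLowerChar_colon {c : Char} (h : PySem.Chars.lowerChar c = ':') : c = ':' := by
  unfold PySem.Chars.lowerChar PySem.Chars.isupper at h
  split_ifs at h with hu
  · exfalso
    simp only [Bool.and_eq_true, decide_eq_true_eq] at hu
    have h1 : (65 : Nat) ≤ c.toNat := hu.1
    have h2 : c.toNat ≤ 90 := hu.2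
    have hv : (Char.ofNat (c.toNat + 32)).toNat = c.toNat + 32 := by
      unfold Char.ofNat Char.toNat
      simp [Char.ofNatAux, (Or.inl (by omega) : Nat.isValidChar (c.toNat + 32))]
      omega
    have h58 : (':' : Char).toNat = c.toNat + 32 := by rw [← h, hv]
    have h58' : (':' : Char).toNat = 58 := rfl
    omega
  · exact h

theorem pvColon_mem_lower {cs : List Char} (h : ':' ∈ PySem.Chars.lower cs) : ':' ∈ cs := by
  simp only [PySem.Chars.lower, List.mem_map] at h
  obtain ⟨c, hc, hl⟩ := h
  rwa [pvLowerChar_colon hl] at hc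

theorem pvPrefix_colon {w h t : List Char} (hw : ':' ∉ w) (hh : ':' ∉ h) :
    ((w ++ [':']) <+: (h ++ ':' :: t)) ↔ w = h := by
  constructor
  · intro hp
    induction w generalizing h with
    | nil =>
        cases h with
        | nil => rfl
        | cons c h' =>
            exfalso
            simp only [List.nil_append, List.cons_append, List.cons_prefix_cons] at hp
            exact hh (by simp [← hp.1])
    | cons a w' ih =>
        cases h with
        | nil =>
            exfalso
            simp only [List.cons_append, List.nil_append, List.cons_prefix_cons] at hp
            exact hw (by simp [hp.1])
        | cons c h' =>
            simp only [List.cons_append, List.cons_prefix_cons] at hp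
            have := ih (fun hx => hw (List.mem_cons_of_mem _ hx))
              (fun hx => hh (List.mem_cons_of_mem _ hx)) hp.2
            rw [hp.1, this]
  · rintro rfl
    exact ⟨t, by simp⟩

theorem pvStartswith_eq {w h t : List Char} (hw : ':' ∉ w) (hh : ':' ∉ h) :
    PySem.Chars.startswith (h ++ ':' :: t) (w ++ [':']) = decide (w = h) := by
  simp only [PySem.Chars.startswith]
  by_cases he : w = h
  · subst he
    simp [List.isPrefixOf_iff_prefix, (pvPrefix_colon hw hh).2 rfl]
  · simp only [he, decide_false]
    rw [Bool.eq_false_iff]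
    intro hc
    exact he ((pvPrefix_colon hw hh).1 (List.isPrefixOf_iff_prefix.mp hc))

theorem pvLower_split (h t : List Char) :
    PySem.Chars.lower (h ++ ':' :: t) = PySem.Chars.lower h ++ ':' :: PySem.Chars.lower t := by
  simp [PySem.Chars.lower, PySem.Chars.lowerChar, PySem.Chars.isupper]

-- A's loop on an input that splits at its first colon equals a membership test of the lowered head.
theorem pvLoopA_chain (h t : List Char) (hh : ':' ∉ h) (ws : List (List Char))
    (hws : ∀ w ∈ ws, ':' ∉ w ∧ PySem.Chars.lower w = w) :
    pvLoopA (h ++ ':' :: t) (ws.map (fun w => w ++ [':'])) =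
      if ws.contains (PySem.Chars.lower h) then PySem.Chars.lower h ++ ':' :: t
      else "raw:".toList ++ (h ++ ':' :: t) := by
  induction ws with
  | nil => simp [pvLoopA]
  | cons w rest ih =>
      obtain ⟨hwc, hwl⟩ := hws w (List.mem_cons_self ..)
      have hlh : ':' ∉ PySem.Chars.lower h := fun hx => hh (pvColon_mem_lower hx)
      have hlen : (PySem.Chars.lower h).length = h.length := by
        simp [PySem.Chars.lower]
      simp only [List.map_cons, pvLoopA]
      rw [pvStartswith_eq hwc hh, pvLower_split, pvStartswith_eq hwc hlh]
      by_cases h1 : w = h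
      · -- literal prefix match: passthrough; note lower h = lower w = w = h here
        have h2 : PySem.Chars.lower h = w := by rw [← h1, hwl]
        simp [h1, h2, List.contains_cons]
      · by_cases h2 : w = PySem.Chars.lower h
        · -- lowercase match: prefix + citekey[len(prefix):]
          have hne : ¬ PySem.Chars.lower h = h := fun e => h1 (h2.trans e)
          have hdrop : PySem.Chars.slice (h ++ ':' :: t) (some (PySem.Chars.len (w ++ [':']))) none = t := by
            rw [PySem.Chars.slice_eq_listSlice]
            have harg : PySem.Chars.len (w ++ [':']) = ((w.length + 1 : Nat) : Int) := by
              simp [PySem.Chars.len]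
            rw [harg, PySem.List.slice_from_natCast]
            have hwh : w.length = h.length := by rw [h2, hlen]
            rw [hwh]
            simp [List.drop_append_of_le_length]
          rw [if_neg (by simp [h1]), if_pos (by simp [h2]), hdrop]
          have hcont : ((w :: rest).contains (PySem.Chars.lower h)) = true := by
            simp [List.contains_cons, ← h2]
          rw [hcont, if_pos rfl]
          simp [h2]
        · have h2' : ¬ PySem.Chars.lower h = w := fun hx => h2 hx.symm
          rw [if_neg (by simp [h1]), if_neg (by simp [h2]),
            ih (fun v hv => hws v (List.mem_cons_of_mem _ hv))]
          have hmem : ((w :: rest).contains (PySem.Chars.lower h)) =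
              rest.contains (PySem.Chars.lower h) := by
            simp [List.contains_cons, h2']
          rw [hmem]

theorem pvLoopA_no_colon (cs : List Char) (hc : ':' ∉ cs) (ps : List (List Char))
    (hps : ∀ p ∈ ps, ':' ∈ p) : pvLoopA cs ps = "raw:".toList ++ cs := by
  induction ps with
  | nil => simp [pvLoopA]
  | cons p rest ih =>
      have hp := hps p (List.mem_cons_self ..)
      have hns : PySem.Chars.startswith cs p = false := by
        rw [Bool.eq_false_iff]
        intro hs
        exact hc ((List.isPrefixOf_iff_prefix.mp hs).subset hp)
      have hns2 : PySem.Chars.startswith (PySem.Chars.lower cs) p = false := by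
        rw [Bool.eq_false_iff]
        intro hs
        exact hc (pvColon_mem_lower ((List.isPrefixOf_iff_prefix.mp hs).subset hp))
      simp only [pvLoopA, hns, hns2, if_false]
      exact ih (fun q hq => hps q (List.mem_cons_of_mem _ hq))

theorem pvValidB_eq : pvValidB = pvWordsA := by decide

-- ===== VERDICT (by name: the statement is the Claim_ definition above) =====
theorem infer_citekey_prefix_spec : Claim_equal_infer_citekey_prefix := by
  intro citekey _
  unfold Spec_infer_citekey_prefix infer_citekey_prefix infer_citekey_prefix_alt
  cases hp : pvPartitionColon citekey.toList with
  | none =>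
      have hc := pvPartitionColon_none hp
      rw [pvLoopA_no_colon citekey.toList hc pvPrefixesA (by decide)]
  | some v =>
      obtain ⟨h, t⟩ := v
      obtain ⟨hcs, hh⟩ := pvPartitionColon_some hp
      simp only
      rw [hcs]
      have : pvPrefixesA = pvWordsA.map (fun w => w ++ [':']) := rfl
      rw [this, pvLoopA_chain h t hh pvWordsA (by decide)]
      rw [pvValidB_eq]
      simp only [PySem.Set.contains]
      split_ifs with h1
      · rfl
      · rfl
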